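-- pv_equiv track=rewrite | github.com/dede6giu/CIC0235-TR1 | CamadaEnlace.py | crc32_insert
-- ===== SOURCE A (Python) =====
-- from typing import List
--
-- def int_to_bool_list(num: int, size: int) -> List[bool]:
--     """
--     Converts an integer into a fixed-size list of booleans representing its
--     binary form. If the binary representation has fewer than `size` bits,
--     the function adds zeros on the left to reach the required number of elements.
--     If it has more, only the least significant `size` bits are kept.
--
--     Args:
--         num (int):
--             The integer to be converted into a bit list.
--         size (int):
--             The required number of bits in the output list.
--
--     Returns:
--         List[bool]:
--             A list of booleans where True represents bit 1 and False represents bit 0.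
--             The list contains exactly `size` elements.
--     """
--
--     # Convert the integer into a binary string (without the '0b' prefix),
--     # add leading zeros to reach the required length,
--     # and keep exactly the last `size` bits.
--     binary_num: str = bin(num)[2:].zfill(size)[-size:]
--
--     # Convert each character ('0' or '1') into a boolean value.
--     bool_list: List[bool] = [c == "1" for c in binary_num]
--
--     return bool_list
--
-- def crc32_insert(payload: List[bool]) -> List[bool]:
--     """
--     Appends a CRC-32 checksum to the given bit sequence.
--
--     Args:
--         payload (List[bool]): The original data bits to be transmitted.
--
--     Returns:
--         List[bool]: The data bits followed by the computed 32-bit CRC.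
--     """
--
--     # CRC-32 (IEEE 802.3) generator polynomial:
--     # x^32 + x^26 + x^23 + x^22 + x^16 + x^12 +
--     # x^11 + x^10 + x^8 + x^7 + x^5 + x^4 + x^2 + x + 1
--     GENERATOR_POLYNOMIAL: int = 0x104C11DB7
--
--     # Append 32 zero bits (CRC placeholder)
--     padding: List[bool] = [False] * 32
--     dividend: List[bool] = payload + padding
--
--     # Convert generator polynomial to bit list (33 bits, MSB first)
--     divisor: List[bool] = int_to_bool_list(num=GENERATOR_POLYNOMIAL, size=33)
--
--     # Initialize remainder with the first 33 bits of the dividend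
--     remainder: List[bool] = dividend[:33]
--
--     # Perform polynomial long division (bitwise)
--     for i in range(len(divisor), len(dividend)):
--         if remainder[0]:
--             # XOR remainder with divisor if the MSB is 1
--             remainder = [a ^ b for a, b in zip(remainder, divisor)]
--         # Shift left by one bit and bring next dividend bit
--         remainder = remainder[1:] + [dividend[i]]
--
--     # Final XOR step after last iteration
--     if remainder[0]:
--         remainder = [a ^ b for a, b in zip(remainder, divisor)]
--     remainder = remainder[1:]  # Drop the MSB (overflow)
--
--     # Remaining 32 bits are the CRC value
--     crc_bits: List[bool] = remainder
--
--     # Append CRC to original payload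
--     payload.extend(crc_bits)
--
--     return payload
-- ===== SOURCE B (Python) =====
-- from typing import List
--
-- def crc32_insert(payload: List[bool]) -> List[bool]:
--     """Table-driven CRC-32: a 16-entry nibble lookup table processes the
--     (zero-augmented) bit stream four bits per step instead of bit-by-bit
--     polynomial long division."""
--     POLY = 0x04C11DB7
--
--     # Precompute the register transition for each possible top nibble.
--     table = []
--     for h in range(16):
--         r = h << 28
--         for _ in range(4):
--             r = ((r << 1) ^ POLY) & 0xFFFFFFFF if r & 0x80000000 else r << 1
--         table.append(r)
--
--     data = payload + [False] * 32
--     k = len(data) % 4  # at most 3 leading bits handled bit-serially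
--     r = 0
--     for bit in data[:k]:
--         hi = r & 0x80000000
--         r = ((r << 1) | bit) & 0xFFFFFFFF
--         if hi:
--             r ^= POLY
--     it = iter(data[k:])
--     for b3, b2, b1, b0 in zip(it, it, it, it):
--         nib = (b3 << 3) | (b2 << 2) | (b1 << 1) | b0
--         r = table[r >> 28] ^ (((r & 0x0FFFFFFF) << 4) | nib)
--     crc_bits = [(r >> (31 - i)) & 1 == 1 for i in range(32)]
--     payload.extend(crc_bits)
--     return payload
-- ===== Notes on version B (the rewrite author's own statement) =====
-- stated objective: faster
-- what changed: Replaces per-bit polynomial long division over 33-element bit lists by a table-driven CRC: a precomputed 16-entry nibble lookup table advances a 32-bit integer register four bits per iteration over the zero-augmented stream.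
-- intended difference: On the empty payload A returns only 31 bits (its final MSB-drop runs even though no full 33-bit window was ever formed), while B returns the intended 32-bit CRC of 32 zero bits; a CRC-32 trailer must be 32 bits, so B's value is the intended one. — e.g. on crc32_insert([]): A returns [false, false, false, false, false, false, false, false, false, false, false, false, false, false, false, false, false,…, B returns [false, false, false, false, false, false, false, false, false, false, false, false, false, false, false, false, false,…
import Mathlib
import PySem

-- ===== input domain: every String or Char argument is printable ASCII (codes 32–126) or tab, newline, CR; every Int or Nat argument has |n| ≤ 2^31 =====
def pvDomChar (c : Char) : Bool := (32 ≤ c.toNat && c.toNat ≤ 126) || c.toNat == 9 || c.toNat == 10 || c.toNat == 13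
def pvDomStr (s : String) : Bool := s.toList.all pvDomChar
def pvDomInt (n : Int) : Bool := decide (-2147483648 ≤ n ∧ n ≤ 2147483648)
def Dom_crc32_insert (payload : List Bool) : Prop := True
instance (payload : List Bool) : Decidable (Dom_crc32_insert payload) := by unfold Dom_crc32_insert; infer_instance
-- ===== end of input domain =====

-- B replaces bit-by-bit polynomial long division over 33-element bit lists by a table-driven CRC:
-- a precomputed 16-entry nibble lookup table advances a 32-bit integer register four bits per step.
-- Equivalence is about the RETURN value; Python A and B both also extend `payload` in place.

-- ===== PORT A =====
-- helper int_to_bool_list; num ≥ 0 at its only call site, where this port is exact: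
-- bin(num)[2:] (MSB-first binary digits), then .zfill(size), then [-size:]
def intToBoolList (num size : Nat) : List Bool :=
  let binary : List Char := Nat.toDigits 2 num
  let padded : List Char := List.replicate (size - binary.length) '0' ++ binary
  let kept : List Char := padded.drop (padded.length - size)
  kept.map (fun c => c == '1')

-- remainder is nonempty throughout, so remainder[0] is its head
def crc32_insert (payload : List Bool) : List Bool :=
  let padding : List Bool := List.replicate 32 false
  let dividend : List Bool := payload ++ padding
  let divisor : List Bool := intToBoolList 0x104C11DB7 33
  let remainder0 : List Bool := PySem.List.slice dividend none (some 33)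
  let remainder : List Bool :=
    (PySem.List.pyRange (divisor.length : Int) (dividend.length : Int) 1).foldl
      (fun remainder i =>
        let remainder := if remainder.headD false then List.zipWith xor remainder divisor else remainder
        PySem.List.slice remainder (some 1) none ++ [PySem.List.pyGetD dividend i false])
      remainder0
  let remainder := if remainder.headD false then List.zipWith xor remainder divisor else remainder
  let remainder := PySem.List.slice remainder (some 1) none
  payload ++ remainder

-- ===== PORT B =====
-- Source B's table loop: 16 entries, each built by 4 masked shift/xor steps from h << 28
def crcNibbleTable : List Nat :=
  (List.range 16).foldl (fun table h =>
    table ++ [(List.range 4).foldl (fun r _ =>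
      if r &&& 0x80000000 ≠ 0 then ((r <<< 1) ^^^ 0x04C11DB7) &&& 0xFFFFFFFF else r <<< 1)
      (h <<< 28)]) []

-- Source B's head loop body (`for bit in data[:k]`)
def bitStep (r : Nat) (bit : Bool) : Nat :=
  let hi := r &&& 0x80000000
  let r := ((r <<< 1) ||| (if bit then 1 else 0)) &&& 0xFFFFFFFF
  if hi ≠ 0 then r ^^^ 0x04C11DB7 else r

-- Source B's `for b3, b2, b1, b0 in zip(it, it, it, it)`: the stream (whose length is a multiple of 4
-- here) is consumed four bits at a time; table index r >>> 28 < 16, so getD's default is never hit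
def nibbleLoop : Nat → List Bool → Nat
  | r, b3 :: b2 :: b1 :: b0 :: rest =>
      nibbleLoop (crcNibbleTable.getD (r >>> 28) 0 ^^^
        (((r &&& 0x0FFFFFFF) <<< 4) |||
          (((if b3 then 1 else 0) <<< 3) ||| ((if b2 then 1 else 0) <<< 2) |||
           ((if b1 then 1 else 0) <<< 1) ||| (if b0 then 1 else 0)))) rest
  | r, _ => r

def crc32_insert_alt (payload : List Bool) : List Bool :=
  let data : List Bool := payload ++ List.replicate 32 false
  let k : Nat := data.length % 4
  let r0 : Nat := (PySem.List.slice data none (some (k : Int))).foldl bitStep 0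
  let r : Nat := nibbleLoop r0 (PySem.List.slice data (some (k : Int)) none)
  let crcBits : List Bool := (List.range 32).map (fun i => (r >>> (31 - i)) &&& 1 == 1)
  payload ++ crcBits

-- ===== PRECONDITION & SPEC =====
-- On the empty payload A returns only 31 bits (its final MSB-drop runs even though no full 33-bit
-- window was ever formed), while B returns the intended 32-bit CRC (32 zero bits); a CRC-32 trailer
-- must be 32 bits, so B's value is the intended one.
def D_crc32_insert (payload : List Bool) : Prop := payload = []
instance (payload : List Bool) : Decidable (D_crc32_insert payload) := by unfold D_crc32_insert; infer_instance
def Spec_crc32_insert (payload : List Bool) (out : List Bool) : Prop := ¬ D_crc32_insert payload → out = crc32_insert_alt payload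
instance (payload : List Bool) (out : List Bool) : Decidable (Spec_crc32_insert payload out) := by unfold Spec_crc32_insert; infer_instance
def pvDiffWitness_crc32_insert : List Bool := []
def pvDiffWitnessOut_crc32_insert : (List Bool) × (List Bool) :=
  ([false, false, false, false, false, false, false, false, false, false, false, false, false, false, false, false, false, false, false, false, false, false, false, false, false, false, false, false, false, false, false],
   [false, false, false, false, false, false, false, false, false, false, false, false, false, false, false, false, false, false, false, false, false, false, false, false, false, false, false, false, false, false, false, false])

-- ===== CLAIM (what is proved, stated in full; the proofs are below) =====
def Claim_unchanged_crc32_insert : Prop := ∀ (payload : List Bool), Dom_crc32_insert payload → Spec_crc32_insert payload (crc32_insert payload)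
def Claim_changed_crc32_insert : Prop := Dom_crc32_insert (pvDiffWitness_crc32_insert) ∧ D_crc32_insert (pvDiffWitness_crc32_insert) ∧ crc32_insert (pvDiffWitness_crc32_insert) = pvDiffWitnessOut_crc32_insert.1 ∧ crc32_insert_alt (pvDiffWitness_crc32_insert) = pvDiffWitnessOut_crc32_insert.2 ∧ pvDiffWitnessOut_crc32_insert.1 ≠ pvDiffWitnessOut_crc32_insert.2
def Claim_exact_crc32_insert : Prop := ∀ (payload : List Bool), Dom_crc32_insert payload → D_crc32_insert payload → crc32_insert payload ≠ crc32_insert_alt payload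

-- ===== LEMMAS AND PROOFS =====
-- the value of an MSB-first bit list
def bval (b : Bool) : Nat := if b then 1 else 0
def lval (xs : List Bool) : Nat := xs.foldl (fun a b => 2 * a + bval b) 0

theorem lval_acc (xs : List Bool) : ∀ (a : Nat),
    xs.foldl (fun a b => 2 * a + bval b) a = a * 2 ^ xs.length + lval xs := by
  induction xs with
  | nil => intro a; simp [lval]
  | cons b t ih =>
    intro a
    simp only [List.foldl_cons, List.length_cons]
    rw [ih (2 * a + bval b)]
    conv_rhs => rw [lval, List.foldl_cons, ih (2 * 0 + bval b)]
    ring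

theorem lval_append_singleton (xs : List Bool) (b : Bool) :
    lval (xs ++ [b]) = 2 * lval xs + bval b := by
  rw [lval, List.foldl_append, List.foldl_cons, List.foldl_nil, lval_acc]
  simp [lval]

theorem lval_cons (b : Bool) (xs : List Bool) :
    lval (b :: xs) = bval b * 2 ^ xs.length + lval xs := by
  rw [lval, List.foldl_cons, lval_acc]; ring_nf

theorem lval_lt (xs : List Bool) : lval xs < 2 ^ xs.length := by
  induction xs with
  | nil => simp [lval]
  | cons b t ih =>
    rw [lval_cons]
    rcases b with _ | _ <;> simp [bval, List.length_cons, pow_succ] <;> omega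

theorem xor_split (a c : Bool) (n x y : Nat) (hx : x < 2 ^ n) (hy : y < 2 ^ n) :
    (bval a * 2 ^ n + x) ^^^ (bval c * 2 ^ n + y) = bval (xor a c) * 2 ^ n + (x ^^^ y) := by
  apply Nat.eq_of_testBit_eq
  intro i
  have hxy : x ^^^ y < 2 ^ n := Nat.xor_lt_two_pow hx hy
  rw [Nat.testBit_xor,
      show bval a * 2 ^ n + x = 2 ^ n * bval a + x by ring,
      show bval c * 2 ^ n + y = 2 ^ n * bval c + y by ring,
      show bval (xor a c) * 2 ^ n + (x ^^^ y) = 2 ^ n * bval (xor a c) + (x ^^^ y) by ring,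
      Nat.testBit_two_pow_mul_add _ hx, Nat.testBit_two_pow_mul_add _ hy,
      Nat.testBit_two_pow_mul_add _ hxy]
  by_cases h : i < n
  · simp [h, Nat.testBit_xor]
  · simp only [h, if_false]
    rcases a with _|_ <;> rcases c with _|_ <;> rcases j : i - n with _|k <;>
      simp [bval]

theorem lval_zipWith_xor (xs : List Bool) : ∀ (ys : List Bool), xs.length = ys.length →
    lval (List.zipWith xor xs ys) = lval xs ^^^ lval ys := by
  induction xs with
  | nil =>
    intro ys h
    have : ys = [] := by cases ys <;> simp_all
    subst this; simp [lval]
  | cons a t ih =>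
    intro ys h
    rcases ys with _ | ⟨c, u⟩
    · simp at h
    · simp only [List.length_cons, Nat.succ.injEq] at h
      rw [List.zipWith_cons_cons, lval_cons, lval_cons, lval_cons, ih u h,
          List.length_zipWith, h, min_self, ← h,
          xor_split a c t.length (lval t) (lval u) (lval_lt t) (by rw [h]; exact lval_lt u)]

-- the bit-serial integer register: the bridge between A's list division and B's table loop
def redN (u : Nat) : Nat := if u ≥ 2 ^ 32 then (u - 2 ^ 32) ^^^ 0x04C11DB7 else u
def stepN (r : Nat) (b : Bool) : Nat := redN (2 * r + bval b)
def divisorL : List Bool := intToBoolList 0x104C11DB7 33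
def redL (w : List Bool) : List Bool := if w.headD false then List.zipWith xor w divisorL else w
def stepL (w : List Bool) (b : Bool) : List Bool := (redL w).drop 1 ++ [b]

theorem divisorL_eq : divisorL = true :: intToBoolList 0x04C11DB7 32 := by decide
theorem lval_divisor_tail : lval (intToBoolList 0x04C11DB7 32) = 0x04C11DB7 := by decide
theorem length_divisor_tail : (intToBoolList 0x04C11DB7 32).length = 32 := by decide

theorem redL_redN (w : List Bool) (h : w.length = 33) :
    lval ((redL w).drop 1) = redN (lval w) ∧ ((redL w).drop 1).length = 32 := by
  rcases w with _ | ⟨b, t⟩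
  · simp at h
  · simp only [List.length_cons] at h
    have ht : t.length = 32 := by omega
    have htlt : lval t < 2 ^ 32 := ht ▸ lval_lt t
    rcases b with _ | _
    · constructor
      · simp only [redL, List.headD, List.drop_one, List.tail_cons, if_neg Bool.false_ne_true]
        rw [lval_cons]
        simp only [bval, if_neg Bool.false_ne_true, Nat.zero_mul, Nat.zero_add, redN, ht]
        rw [if_neg (by omega)]
      · simp [redL, ht]
    · constructor
      · simp only [redL, List.headD]
        rw [if_pos trivial, divisorL_eq, List.zipWith_cons_cons, List.drop_one, List.tail_cons]
        rw [lval_zipWith_xor t _ (by rw [ht, length_divisor_tail]), lval_divisor_tail]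
        rw [lval_cons, show bval true = 1 from rfl, Nat.one_mul, ht, redN,
            if_pos (by omega)]
        have h3 : 2 ^ 32 + lval t - 2 ^ 32 = lval t := by omega
        rw [h3]
      · simp [redL, divisorL_eq, ht, length_divisor_tail]

theorem stepL_stepN (w : List Bool) (b : Bool) (h : w.length = 33) :
    lval (stepL w b) = 2 * redN (lval w) + bval b ∧ (stepL w b).length = 33 := by
  obtain ⟨h1, h2⟩ := redL_redN w h
  constructor
  · rw [stepL, lval_append_singleton, h1]
  · rw [stepL, List.length_append, h2]; rfl

theorem fold_corr (rest : List Bool) :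
    ∀ w : List Bool, w.length = 33 →
      (rest.foldl stepL w).length = 33 ∧
      redN (lval (rest.foldl stepL w)) = rest.foldl stepN (redN (lval w)) := by
  induction rest with
  | nil => intro w h; exact ⟨h, rfl⟩
  | cons b rest ih =>
    intro w h
    obtain ⟨h1, h2⟩ := stepL_stepN w b h
    obtain ⟨ih1, ih2⟩ := ih (stepL w b) h2
    refine ⟨by simpa using ih1, ?_⟩
    simp only [List.foldl_cons]
    rw [ih2, h1]
    rfl

theorem foldl_stepN_small (xs : List Bool) : ∀ a : Nat,
    a * 2 ^ xs.length + lval xs < 2 ^ 32 → xs.foldl stepN a = a * 2 ^ xs.length + lval xs := by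
  induction xs with
  | nil => intro a _; simp [lval]
  | cons b t ih =>
    intro a h
    rw [lval_cons] at h
    simp only [List.length_cons, pow_succ] at h
    have h1 : 1 ≤ 2 ^ t.length := Nat.one_le_two_pow
    have hb : bval b ≤ 1 := by rcases b with _|_ <;> simp [bval]
    rw [List.foldl_cons, show stepN a b = 2 * a + bval b from ?_, ih _ (by nlinarith)]
    · simp only [List.length_cons, lval_cons, pow_succ]; ring
    · rw [stepN, redN, if_neg (by simp; nlinarith)]

theorem testBit_lval (xs : List Bool) : ∀ k, k < xs.length →
    (lval xs).testBit k = xs.getD (xs.length - 1 - k) false := by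
  induction xs with
  | nil => intro k h; simp at h
  | cons b t ih =>
    intro k h
    rw [lval_cons,
        show bval b * 2 ^ t.length + lval t = 2 ^ t.length * bval b + lval t by ring,
        Nat.testBit_two_pow_mul_add _ (lval_lt t)]
    by_cases hk : k < t.length
    · rw [if_pos hk, ih k hk]
      have h2 : (b :: t).length - 1 - k = (t.length - 1 - k) + 1 := by simp; omega
      rw [h2, List.getD_cons_succ]
    · have hke : k = t.length := by simp at h; omega
      subst hke
      rw [if_neg (by omega)]
      simp only [List.length_cons, Nat.add_sub_cancel, Nat.sub_self, List.getD_cons_zero]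
      rcases b with _|_ <;> simp [bval]

theorem testBit_expr (n k : Nat) : ((n >>> k) &&& 1 == 1) = n.testBit k := by
  simp [Nat.testBit, Nat.and_comm]

theorem bits_of_lval (xs : List Bool) (h : xs.length = 32) :
    (List.range 32).map (fun i => ((lval xs) >>> (31 - i)) &&& 1 == 1) = xs := by
  apply List.ext_getElem
  · simp [h]
  · intro i h1 h2
    simp only [List.getElem_map, List.getElem_range]
    have hi : i < 32 := by simpa using h1
    rw [testBit_expr, testBit_lval xs (31 - i) (by omega)]
    rw [List.getD_eq_getElem xs false (by omega)]
    congr 1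
    omega

theorem length_divisorL : divisorL.length = 33 := by decide

theorem portA_eq (payload : List Bool) :
    crc32_insert payload =
      payload ++ (redL (((payload ++ List.replicate 32 false).drop 33).foldl stepL
        ((payload ++ List.replicate 32 false).take 33))).drop 1 := by
  unfold crc32_insert
  simp only [show intToBoolList 0x104C11DB7 33 = divisorL from rfl, length_divisorL]
  rw [PySem.List.slice_to _ (b := 33) (by norm_num)]
  have hbody : (fun (remainder : List Bool) (i : Int) =>
      PySem.List.slice (if remainder.headD false then List.zipWith xor remainder divisorL else remainder) (some 1) ++ [PySem.List.pyGetD (payload ++ List.replicate 32 false) i false])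
      = (fun acc j => stepL acc (PySem.List.pyGetD (payload ++ List.replicate 32 false) j false)) := by
    funext acc j
    simp [stepL, redL, PySem.List.slice_from_one, List.drop_one]
  rw [hbody, PySem.List.foldl_pyRange_pyGetD' _ false stepL _ (a := ((33:Nat):Int)) (by positivity)]
  simp [redL, PySem.List.slice_from_one, List.drop_one]

-- ---- B-side: the table loop computes the same register as the bit-serial fold stepN ----

theorem disj_xor_add (n a b : Nat) (hb : b < 2 ^ n) : (2 ^ n * a) ^^^ b = 2 ^ n * a + b := by
  apply Nat.eq_of_testBit_eq
  intro i
  rw [Nat.testBit_xor, Nat.testBit_two_pow_mul_add _ hb,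
      show 2 ^ n * a = 2 ^ n * a + 0 by omega, Nat.testBit_two_pow_mul_add _ (Nat.two_pow_pos n)]
  by_cases h : i < n
  · simp [h]
  · have hbf : b.testBit i = false :=
      Nat.testBit_lt_two_pow (lt_of_lt_of_le hb (Nat.pow_le_pow_right (by norm_num) (Nat.le_of_not_lt h)))
    simp [h, hbf]

theorem disj_or_add (n a b : Nat) (hb : b < 2 ^ n) : (2 ^ n * a) ||| b = 2 ^ n * a + b := by
  apply Nat.eq_of_testBit_eq
  intro i
  rw [Nat.testBit_or, Nat.testBit_two_pow_mul_add _ hb,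
      show 2 ^ n * a = 2 ^ n * a + 0 by omega, Nat.testBit_two_pow_mul_add _ (Nat.two_pow_pos n)]
  by_cases h : i < n
  · simp [h]
  · have hbf : b.testBit i = false :=
      Nat.testBit_lt_two_pow (lt_of_lt_of_le hb (Nat.pow_le_pow_right (by norm_num) (Nat.le_of_not_lt h)))
    simp [h, hbf]

theorem stepN_lt (r : Nat) (b : Bool) (h : r < 2 ^ 32) : stepN r b < 2 ^ 32 := by
  have hb : bval b ≤ 1 := by rcases b with _|_ <;> simp [bval]
  rw [stepN, redN]
  split_ifs with h1
  · exact Nat.xor_lt_two_pow (by omega) (by norm_num)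
  · omega

theorem foldl_stepN_lt (xs : List Bool) : ∀ r, r < 2 ^ 32 → xs.foldl stepN r < 2 ^ 32 := by
  induction xs with
  | nil => intro r h; exact h
  | cons b t ih => intro r h; exact ih _ (stepN_lt r b h)

theorem testBit31_iff (r : Nat) (h : r < 2 ^ 32) : r.testBit 31 = true ↔ 2 ^ 31 ≤ r := by
  rw [Nat.testBit_eq_decide_div_mod_eq]
  constructor <;> intro h1 <;> simp_all <;> omega

-- stepN in pure-xor form (for r < 2^32)
theorem stepN_eq_xor (r : Nat) (b : Bool) (h : r < 2 ^ 32) :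
    stepN r b = (2 * r ^^^ bval b) ^^^ (if 2 ^ 31 ≤ r then 0x104C11DB7 else 0) := by
  have hb : bval b ≤ 1 := by rcases b with _|_ <;> simp [bval]
  have h2 : 2 * r ^^^ bval b = 2 * r + bval b := by
    have := disj_xor_add 1 r (bval b) (by omega)
    simpa [pow_one, Nat.mul_comm] using this
  rw [stepN, redN, h2]
  split_ifs with h3 h4 h4
  · have hu : 2 * r + bval b - 2 ^ 32 < 2 ^ 32 := by omega
    have hsplit : (2 ^ 32 * 1) ^^^ (2 * r + bval b - 2 ^ 32) = 2 * r + bval b := by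
      rw [disj_xor_add 32 1 _ hu]; omega
    have hx : (2 * r + bval b) ^^^ 2 ^ 32 = 2 * r + bval b - 2 ^ 32 := by
      conv_lhs => rw [← hsplit]
      rw [Nat.mul_one, Nat.xor_comm (2 ^ 32), Nat.xor_assoc, Nat.xor_self, Nat.xor_zero]
    rw [show (0x104C11DB7 : Nat) = 2 ^ 32 ^^^ 0x04C11DB7 by decide, ← Nat.xor_assoc, hx]
  · omega
  · omega
  · simp

theorem bval_xor (a b : Bool) : bval (xor a b) = bval a ^^^ bval b := by
  rcases a with _|_ <;> rcases b with _|_ <;> rfl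

theorem two_mul_xor (x y : Nat) : 2 * (x ^^^ y) = 2 * x ^^^ 2 * y := by
  simpa [Nat.shiftLeft_eq, Nat.mul_comm] using
    (Nat.shiftLeft_xor_distrib (i := 1) (a := x) (b := y))

theorem stepN_linear (x y : Nat) (a b : Bool) (hx : x < 2 ^ 32) (hy : y < 2 ^ 32) :
    stepN (x ^^^ y) (xor a b) = stepN x a ^^^ stepN y b := by
  have hxy : x ^^^ y < 2 ^ 32 := Nat.xor_lt_two_pow hx hy
  rw [stepN_eq_xor _ _ hxy, stepN_eq_xor _ _ hx, stepN_eq_xor _ _ hy, two_mul_xor, bval_xor]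
  have hcond : (if 2 ^ 31 ≤ x ^^^ y then (0x104C11DB7 : Nat) else 0)
      = (if 2 ^ 31 ≤ x then (0x104C11DB7 : Nat) else 0) ^^^ (if 2 ^ 31 ≤ y then (0x104C11DB7 : Nat) else 0) := by
    have hx' : (2 ^ 31 ≤ x) = (x.testBit 31 = true) := propext (testBit31_iff x hx).symm
    have hy' : (2 ^ 31 ≤ y) = (y.testBit 31 = true) := propext (testBit31_iff y hy).symm
    have hxy' : (2 ^ 31 ≤ (x ^^^ y)) = ((x ^^^ y).testBit 31 = true) := propext (testBit31_iff _ hxy).symm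
    simp only [hx', hy', hxy', Nat.testBit_xor]
    cases x.testBit 31 <;> cases y.testBit 31 <;> simp
  rw [hcond]
  ac_rfl

theorem foldl_stepN_linear (bs : List Bool) : ∀ (cs : List Bool) (x y : Nat),
    bs.length = cs.length → x < 2 ^ 32 → y < 2 ^ 32 →
    (List.zipWith xor bs cs).foldl stepN (x ^^^ y) = bs.foldl stepN x ^^^ cs.foldl stepN y := by
  induction bs with
  | nil =>
    intro cs x y h _ _
    have : cs = [] := by cases cs <;> simp_all
    subst this; rfl
  | cons a t ih =>
    intro cs x y h hx hy
    rcases cs with _ | ⟨b, u⟩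
    · simp at h
    · simp only [List.length_cons, Nat.succ.injEq] at h
      rw [List.zipWith_cons_cons, List.foldl_cons, List.foldl_cons, List.foldl_cons,
          stepN_linear x y a b hx hy, ih u _ _ h (stepN_lt x a hx) (stepN_lt y b hy)]

theorem table_spec : ∀ h < 16, crcNibbleTable.getD h 0
    = [false, false, false, false].foldl stepN (2 ^ 28 * h) := by decide

theorem nib4 (r : Nat) (h : r < 2 ^ 32) (b3 b2 b1 b0 : Bool) :
    crcNibbleTable.getD (r >>> 28) 0 ^^^
      (((r &&& 0x0FFFFFFF) <<< 4) |||
        (((if b3 then 1 else 0) <<< 3) ||| ((if b2 then 1 else 0) <<< 2) |||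
         ((if b1 then 1 else 0) <<< 1) ||| (if b0 then 1 else 0)))
    = [b3, b2, b1, b0].foldl stepN r := by
  have hnv : (((if b3 then (1:Nat) else 0) <<< 3) ||| ((if b2 then 1 else 0) <<< 2) |||
      ((if b1 then 1 else 0) <<< 1) ||| (if b0 then 1 else 0)) = lval [b3, b2, b1, b0] := by
    rcases b3 with _|_ <;> rcases b2 with _|_ <;> rcases b1 with _|_ <;> rcases b0 with _|_ <;> decide
  have hlv : lval [b3, b2, b1, b0] < 16 := by
    have := lval_lt [b3, b2, b1, b0]; simpa using this
  have hq : r / 2 ^ 28 < 16 := by omega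
  have hhi : r >>> 28 = r / 2 ^ 28 := Nat.shiftRight_eq_div_pow r 28
  have hlo : r &&& 0x0FFFFFFF = r % 2 ^ 28 := by
    have := Nat.and_two_pow_sub_one_eq_mod r 28
    norm_num at this ⊢
    exact this
  have hsplitr : 2 ^ 28 * (r / 2 ^ 28) ^^^ r % 2 ^ 28 = r := by
    rw [disj_xor_add 28 _ _ (Nat.mod_lt r (by norm_num))]
    omega
  have hzip : List.zipWith xor [false, false, false, false] [b3, b2, b1, b0] = [b3, b2, b1, b0] := by
    simp
  have hlin := foldl_stepN_linear [false, false, false, false] [b3, b2, b1, b0]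
      (2 ^ 28 * (r / 2 ^ 28)) (r % 2 ^ 28) (by simp) (by omega)
      (lt_trans (Nat.mod_lt r (by norm_num)) (by norm_num))
  rw [hzip, hsplitr] at hlin
  rw [hlin, hhi, table_spec _ hq, hnv, hlo]
  congr 1
  rw [foldl_stepN_small [b3, b2, b1, b0] (r % 2 ^ 28) (by
    have := Nat.mod_lt r (show 0 < 2 ^ 28 by norm_num)
    simp only [List.length_cons, List.length_nil]
    omega)]
  rw [Nat.shiftLeft_eq, show ((2:Nat) ^ 4) = 16 by norm_num,
      show r % 2 ^ 28 * 16 = 2 ^ 4 * (r % 2 ^ 28) by ring,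
      disj_or_add 4 _ _ (by simpa using hlv)]
  simp only [List.length_cons, List.length_nil]
  ring

theorem nibbleLoop_eq (n : Nat) : ∀ (bits : List Bool) (r : Nat),
    bits.length = 4 * n → r < 2 ^ 32 → nibbleLoop r bits = bits.foldl stepN r := by
  induction n with
  | zero =>
    intro bits r h _
    have : bits = [] := by simpa using List.length_eq_zero_iff.1 (by omega)
    subst this; rfl
  | succ n ih =>
    intro bits r h hr
    rcases bits with _ | ⟨b3, rest⟩; · simp only [List.length_nil] at h; omega
    rcases rest with _ | ⟨b2, rest⟩; · simp only [List.length_cons, List.length_nil] at h; omega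
    rcases rest with _ | ⟨b1, rest⟩; · simp only [List.length_cons, List.length_nil] at h; omega
    rcases rest with _ | ⟨b0, rest⟩; · simp only [List.length_cons, List.length_nil] at h; omega
    have hlen : rest.length = 4 * n := by simp only [List.length_cons] at h; omega
    rw [nibbleLoop, nib4 r hr b3 b2 b1 b0]
    have hr4 : [b3, b2, b1, b0].foldl stepN r < 2 ^ 32 := foldl_stepN_lt _ r hr
    rw [ih rest _ hlen hr4]
    simp [List.foldl_cons]

theorem bitStep_eq_stepN (r : Nat) (b : Bool) (h : r < 2 ^ 32) : bitStep r b = stepN r b := by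
  have hb : bval b ≤ 1 := by rcases b with _|_ <;> simp [bval]
  have hshift : r <<< 1 = 2 * r := by rw [Nat.shiftLeft_eq]; ring
  have hor : 2 * r ||| (if b then 1 else 0) = 2 * r + bval b := by
    have := disj_or_add 1 r (bval b) (by omega)
    simpa [pow_one, Nat.mul_comm, bval] using this
  have hand : (2 * r + bval b) &&& 0xFFFFFFFF = (2 * r + bval b) % 2 ^ 32 := by
    have := Nat.and_two_pow_sub_one_eq_mod (2 * r + bval b) 32
    norm_num at this ⊢
    exact this
  have hhi : (r &&& 0x80000000 ≠ 0) ↔ 2 ^ 31 ≤ r := by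
    rw [show (0x80000000 : Nat) = 2 ^ 31 by norm_num, Nat.and_two_pow]
    rcases hb31 : r.testBit 31 with _|_
    · simp only [Bool.toNat_false, Nat.zero_mul, ne_eq, not_true_eq_false, false_iff]
      intro hc
      exact absurd ((testBit31_iff r h).2 hc) (by simp [hb31])
    · simp only [Bool.toNat_true, Nat.one_mul]
      constructor
      · intro _; exact (testBit31_iff r h).1 hb31
      · intro _; norm_num
  rw [bitStep]
  simp only [hshift, hor, hand]
  rw [stepN, redN]
  by_cases h1 : 2 ^ 31 ≤ r
  · rw [if_pos (hhi.2 h1), if_pos (by omega)]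
    have hmod : (2 * r + bval b) % 2 ^ 32 = 2 * r + bval b - 2 ^ 32 := by omega
    rw [hmod]
  · rw [if_neg (by simpa [hhi] using h1), if_neg (by omega)]
    omega

theorem foldl_bitStep_eq (xs : List Bool) : ∀ r, r < 2 ^ 32 → xs.foldl bitStep r = xs.foldl stepN r := by
  induction xs with
  | nil => intro r _; rfl
  | cons b t ih =>
    intro r h
    rw [List.foldl_cons, List.foldl_cons, bitStep_eq_stepN r b h]
    exact ih _ (stepN_lt r b h)

theorem altB_eq (payload : List Bool) :
    crc32_insert_alt payload =
      payload ++ (List.range 32).map (fun i =>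
        (((payload ++ List.replicate 32 false).foldl stepN 0) >>> (31 - i)) &&& 1 == 1) := by
  simp only [crc32_insert_alt, PySem.List.slice_to_natCast, PySem.List.slice_from_natCast]
  set data := payload ++ List.replicate 32 false with hdata
  set k := data.length % 4 with hk
  have hsplit : data.foldl stepN 0 = (data.drop k).foldl stepN ((data.take k).foldl stepN 0) := by
    conv_lhs => rw [← List.take_append_drop k data]
    rw [List.foldl_append]
  have hhead : (data.take k).foldl bitStep 0 = (data.take k).foldl stepN 0 :=
    foldl_bitStep_eq _ 0 (by norm_num)
  have hr0 : (data.take k).foldl stepN 0 < 2 ^ 32 := foldl_stepN_lt _ 0 (by norm_num)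
  have hlen : (data.drop k).length = 4 * (data.length / 4) := by
    rw [List.length_drop, hk]
    omega
  rw [hhead, nibbleLoop_eq (data.length / 4) _ _ hlen hr0, ← hsplit]

theorem main_eq (payload : List Bool) (hp : payload ≠ []) :
    crc32_insert payload = crc32_insert_alt payload := by
  have hplen : 1 ≤ payload.length := by
    rcases payload with _ | _
    · exact absurd rfl hp
    · simp
  set dividend := payload ++ List.replicate 32 false with hdiv
  have hlen : dividend.length = payload.length + 32 := by simp [hdiv]
  have htake : (dividend.take 33).length = 33 := by
    rw [List.length_take]; omega
  set rem := (dividend.drop 33).foldl stepL (dividend.take 33) with hrem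
  have hsplitfold : dividend.foldl stepN 0
      = (dividend.drop 33).foldl stepN ((dividend.take 33).foldl stepN 0) := by
    conv_lhs => rw [← List.take_append_drop 33 dividend]
    rw [List.foldl_append]
  obtain ⟨ys, b, hys⟩ : ∃ ys b, dividend.take 33 = ys ++ [b] := by
    rcases List.eq_nil_or_concat (dividend.take 33) with h | ⟨ys, b, h⟩
    · rw [h] at htake; simp at htake
    · exact ⟨ys, b, by simpa using h⟩
  have hyslen : ys.length = 32 := by
    rw [hys, List.length_append] at htake; simpa using htake
  have hysl : lval ys < 2 ^ 32 := by
    have h5 := lval_lt ys; rwa [hyslen] at h5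
  have hinit : (dividend.take 33).foldl stepN 0 = redN (lval (dividend.take 33)) := by
    rw [hys, List.foldl_append, List.foldl_cons, List.foldl_nil,
        foldl_stepN_small ys 0 (by simpa using hysl), lval_append_singleton]
    simp [stepN]
  obtain ⟨hremlen, hcorr⟩ := fold_corr (dividend.drop 33) (dividend.take 33) htake
  obtain ⟨hred1, hred2⟩ := redL_redN rem hremlen
  rw [portA_eq, altB_eq, hsplitfold, hinit, ← hcorr, ← hred1, bits_of_lval _ hred2]

-- ===== VERDICT (by name: the statement is the Claim_ definition above) =====
theorem crc32_insert_spec : Claim_unchanged_crc32_insert := by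
  intro payload _ hD
  exact main_eq payload hD

set_option maxRecDepth 80000 in
theorem crc32_insert_changed : Claim_changed_crc32_insert := by
  unfold Claim_changed_crc32_insert; decide

set_option maxRecDepth 80000 in
theorem crc32_insert_tight : Claim_exact_crc32_insert := by
  intro payload _ hD
  subst hD
  decide
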